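-- pv_equiv track=rewrite | github.com/Klaudia1303/student_code_analysis | Progetto-tirocinio2024/data/student_data/2079322_Casolino/LabPython08/A_Ex8.py | A_Ex8
-- ===== SOURCE A (Python) =====
-- def A_Ex8(l):
--
--     insieme=set()
--     if len(l)==0:
--         return insieme
--
--     insiemeA=set()
--     l1=[]
--     for i in l:
--         i=list(i)               #converto l'insieme in una lista
--         for j in i:             #prendo i singoli elementi della lista che sono quelli dell'insieme
--             l1.append(j)        #...e li aggiungo alla lista l1 inizializzata prima
--
--     l2=l1.copy()                #creo una copia della lista l1 per modificarla
--     for elem in l1:             #prendo ciascun elemento della lista l1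
--         if l1.count(elem)>1:    #controllo quante volte quell'elemento è presente nella lista, se più di una volta lo tolgo dalla lista "copia"
--             l2.remove(elem)
--     insiemeA=set(l2)            #converto la lista con gli elementi rimossi in un insieme
--     return insiemeA
-- ===== SOURCE B (Python) =====
-- def A_Ex8(l):
--     seen = set()
--     dup = set()
--     for s in l:
--         for x in s:
--             if x in seen:
--                 dup.add(x)
--             else:
--                 seen.add(x)
--     return seen - dup
-- ===== Notes on version B (the rewrite author's own statement) =====
-- stated objective: faster
-- what changed: Replaces the flatten-then-l1.count/l2.remove quadratic pass with a single pass maintaining 'seen' and 'dup' sets, returning seen - dup.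
import Mathlib
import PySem

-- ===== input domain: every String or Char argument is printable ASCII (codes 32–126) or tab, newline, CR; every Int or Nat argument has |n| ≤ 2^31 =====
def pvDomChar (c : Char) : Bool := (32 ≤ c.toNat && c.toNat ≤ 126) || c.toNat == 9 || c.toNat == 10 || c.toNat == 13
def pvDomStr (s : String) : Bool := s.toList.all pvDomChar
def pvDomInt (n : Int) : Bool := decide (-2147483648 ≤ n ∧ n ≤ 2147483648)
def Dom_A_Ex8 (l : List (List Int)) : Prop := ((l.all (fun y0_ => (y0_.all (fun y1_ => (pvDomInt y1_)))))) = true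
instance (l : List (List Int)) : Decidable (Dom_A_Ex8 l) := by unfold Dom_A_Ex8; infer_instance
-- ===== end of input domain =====

-- B replaces A's flatten + l1.count/l2.remove quadratic pass with a single pass over the
-- elements maintaining 'seen' and 'dup' sets, returning seen - dup.


-- ===== PORT A =====
def A_Ex8 (l : List (List Int)) : List Int :=
  if l.length == 0 then (PySem.Set.empty : PySem.Set Int)
  else
    -- for i in l: i = list(i); for j in i: l1.append(j)
    let l1 : List Int := l.foldl (fun acc i => i.foldl (fun acc j => acc ++ [j]) acc) []
    -- l2 = l1.copy(); for elem in l1: if l1.count(elem) > 1: l2.remove(elem)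
    let l2 : List Int := l1.foldl (fun l2 elem =>
      if l1.count elem > 1 then
        -- none would be Python's ValueError; unreachable: elem is always still in l2
        (PySem.List.remove? l2 elem).getD l2
      else l2) l1
    PySem.Set.ofList l2

-- ===== PORT B =====
def A_Ex8_alt (l : List (List Int)) : List Int :=
  let p : PySem.Set Int × PySem.Set Int :=
    l.foldl (fun p s =>
      s.foldl (fun p x =>
        if PySem.Set.contains p.1 x then (p.1, PySem.Set.add p.2 x)
        else (PySem.Set.add p.1 x, p.2)) p) (PySem.Set.empty, PySem.Set.empty)
  PySem.Set.diff p.1 p.2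

-- ===== PRECONDITION & SPEC =====
def Spec_A_Ex8 (l : List (List Int)) (out : List Int) : Prop := out = A_Ex8_alt l
instance (l : List (List Int)) (out : List Int) : Decidable (Spec_A_Ex8 l out) := by unfold Spec_A_Ex8; infer_instance

-- ===== CLAIM (what is proved, stated in full; the proofs are below) =====
def Claim_equal_A_Ex8 : Prop := ∀ (l : List (List Int)), Dom_A_Ex8 l → Spec_A_Ex8 l (A_Ex8 l)

-- ===== LEMMAS AND PROOFS =====

-- the append loop building l1 is acc ++ flatten
theorem pv_flat (l : List (List Int)) (acc : List Int) :
    l.foldl (fun acc i => i.foldl (fun acc j => acc ++ [j]) acc) acc = acc ++ l.flatten := by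
  induction l generalizing acc with
  | nil => simp
  | cons i l ih =>
      have h : ∀ (i : List Int) (a : List Int), i.foldl (fun acc j => acc ++ [j]) a = a ++ i := by
        intro i; induction i with
        | nil => simp
        | cons x xs ihx => intro a; simp [List.foldl, ihx]
      rw [List.foldl_cons, h, ih, List.flatten_cons, List.append_assoc]

theorem pv_flat0 (l : List (List Int)) :
    l.foldl (fun acc i => i.foldl (fun acc j => acc ++ [j]) acc) [] = l.flatten := by
  rw [pv_flat, List.nil_append]

-- the remove loop's step is (if count > 1 then erase else id)
theorem pv_stepA (l1 s : List Int) (e : Int) :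
    (if l1.count e > 1 then (PySem.List.remove? s e).getD s else s)
      = (if l1.count e > 1 then s.erase e else s) := by
  split_ifs with h
  · by_cases hm : e ∈ s
    · simp [PySem.List.remove?_eq_some_erase s e hm]
    · simp [(PySem.List.remove?_eq_none_iff s e).mpr hm, List.erase_of_not_mem hm]
  · rfl

-- folding erase-if over t removes every copy of the C-elements of s, provided t has at least as many
theorem pv_eraseFold (C : Int → Prop) [DecidablePred C] (t : List Int) :
    ∀ s : List Int, (∀ e, C e → s.count e ≤ t.count e) →
    t.foldl (fun s e => if C e then s.erase e else s) s = s.filter (fun e => !(decide (C e))) := by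
  induction t with
  | nil =>
      intro s h
      have : ∀ e ∈ s, (!(decide (C e))) = true := by
        intro e he
        have := h e
        by_cases hc : C e
        · have := this hc; simp at this
          exact absurd (List.count_pos_iff.mpr he) (by omega)
        · simp [hc]
      simp [List.filter_eq_self.mpr this]
  | cons x t ih =>
      intro s h
      by_cases hx : C x
      · simp only [List.foldl_cons, if_pos hx]
        have h' : ∀ e, C e → (s.erase x).count e ≤ t.count e := by
          intro e he
          by_cases hex : e = x
          · subst hex
            have := h e he
            rw [List.count_erase_self]
            simp [List.count_cons] at this ⊢; omega
          · rw [List.count_erase_of_ne hex]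
            have := h e he
            simp [Ne.symm hex] at this; omega
        rw [ih _ h']
        -- erasing an x (filtered out anyway) does not change the filter
        have : ∀ s : List Int, (s.erase x).filter (fun e => !(decide (C e))) = s.filter (fun e => !(decide (C e))) := by
          intro s; induction s with
          | nil => simp
          | cons a s ihs =>
              by_cases hax : a = x
              · subst hax; simp [List.erase_cons_head, List.filter_cons, hx]
              · rw [List.erase_cons_tail (by simp [hax])]
                simp [List.filter_cons, ihs]
        exact this s
      · simp only [List.foldl_cons, if_neg hx]
        apply ih
        intro e he
        have := h e he
        have hex : e ≠ x := fun hh => hx (hh ▸ he)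
        simp [Ne.symm hex] at this; omega

-- A (on any input) computes the count-1 elements of the flattening, in order
theorem pv_A_eq (l : List (List Int)) :
    A_Ex8 l = (l.flatten).filter (fun e => !(decide ((l.flatten).count e > 1))) := by
  unfold A_Ex8
  split_ifs with h
  · have : l = [] := by simpa using h
    subst this; rfl
  · rw [pv_flat0]
    set c := l.flatten with hc
    simp only [pv_stepA]
    rw [pv_eraseFold (fun e => c.count e > 1) c c (fun e _ => le_refl _)]
    have hnodup : (c.filter (fun e => !(decide (c.count e > 1)))).Nodup := by
      rw [List.nodup_iff_count_le_one]
      intro a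
      by_cases hca : c.count a > 1
      · have h0 : List.count a (c.filter (fun e => !(decide (c.count e > 1)))) = 0 := by
          rw [List.count_eq_zero]
          intro hmem
          rw [List.mem_filter] at hmem
          simp at hmem
          omega
        omega
      · rw [List.count_filter (by simp; omega)]
        omega
    rw [PySem.Set.ofList_eq_self_of_nodup _ hnodup]

-- B's double fold is the single fold over the flattening
theorem pv_B_flat (l : List (List Int)) (p : PySem.Set Int × PySem.Set Int) :
    l.foldl (fun p s =>
      s.foldl (fun p x =>
        if PySem.Set.contains p.1 x then (p.1, PySem.Set.add p.2 x)
        else (PySem.Set.add p.1 x, p.2)) p) p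
    = (l.flatten).foldl (fun p x =>
        if PySem.Set.contains p.1 x then (p.1, PySem.Set.add p.2 x)
        else (PySem.Set.add p.1 x, p.2)) p := by
  induction l generalizing p with
  | nil => simp
  | cons s l ih => rw [List.foldl_cons, List.flatten_cons, List.foldl_append, ih]

-- the seen component is fold of Set.add
theorem pv_B_seen (c : List Int) : ∀ p : PySem.Set Int × PySem.Set Int, p.1.Nodup →
    (c.foldl (fun p x =>
        if PySem.Set.contains p.1 x then (p.1, PySem.Set.add p.2 x)
        else (PySem.Set.add p.1 x, p.2)) p).1 = c.foldl PySem.Set.add p.1 := by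
  induction c with
  | nil => intro p _; rfl
  | cons x c ih =>
      intro p hn
      rw [List.foldl_cons, List.foldl_cons]
      by_cases hm : x ∈ p.1
      · rw [if_pos (by rw [PySem.Set.contains_iff]; exact hm)]
        rw [ih (p.1, PySem.Set.add p.2 x) hn, PySem.Set.add_of_mem hm]
      · rw [if_neg (by rw [PySem.Set.contains_iff]; exact hm)]
        exact ih (PySem.Set.add p.1 x, p.2) (PySem.Set.nodup_add p.1 x hn)

-- membership of the dup component
theorem pv_B_dup (c : List Int) : ∀ (p : PySem.Set Int × PySem.Set Int) (e : Int), p.2.Nodup →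
    (e ∈ (c.foldl (fun p x =>
        if PySem.Set.contains p.1 x then (p.1, PySem.Set.add p.2 x)
        else (PySem.Set.add p.1 x, p.2)) p).2
      ↔ e ∈ p.2 ∨ (e ∈ p.1 ∧ e ∈ c) ∨ 2 ≤ c.count e) := by
  induction c with
  | nil =>
      intro p e _; simp
  | cons x c ih =>
      intro p e hn
      rw [List.foldl_cons]
      by_cases hm : x ∈ p.1
      · rw [if_pos (by rw [PySem.Set.contains_iff]; exact hm)]
        rw [ih (p.1, PySem.Set.add p.2 x) e (PySem.Set.nodup_add p.2 x hn)]
        simp only [PySem.Set.mem_add]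
        constructor
        · rintro ((hd | rfl) | ⟨h1, h2⟩ | hcnt)
          · exact Or.inl hd
          · exact Or.inr (Or.inl ⟨hm, List.mem_cons_self⟩)
          · exact Or.inr (Or.inl ⟨h1, List.mem_cons_of_mem _ h2⟩)
          · refine Or.inr (Or.inr ?_)
            by_cases hex : x = e
            · subst hex; rw [List.count_cons_self]; omega
            · rw [List.count_cons_of_ne hex]; exact hcnt
        · rintro (hd | ⟨h1, h2⟩ | hcnt)
          · exact Or.inl (Or.inl hd)
          · rcases List.mem_cons.mp h2 with rfl | h2'
            · exact Or.inl (Or.inr rfl)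
            · exact Or.inr (Or.inl ⟨h1, h2'⟩)
          · by_cases hex : x = e
            · exact Or.inl (Or.inr hex.symm)
            · rw [List.count_cons_of_ne hex] at hcnt
              exact Or.inr (Or.inr hcnt)
      · rw [if_neg (by rw [PySem.Set.contains_iff]; exact hm)]
        rw [ih (PySem.Set.add p.1 x, p.2) e hn]
        simp only [PySem.Set.mem_add]
        constructor
        · rintro (hd | ⟨h1 | heq, h2⟩ | hcnt)
          · exact Or.inl hd
          · exact Or.inr (Or.inl ⟨h1, List.mem_cons_of_mem _ h2⟩)
          · subst heq
            refine Or.inr (Or.inr ?_)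
            have h3 : 1 ≤ c.count e := List.count_pos_iff.mpr h2
            rw [List.count_cons_self]; omega
          · refine Or.inr (Or.inr ?_)
            by_cases hex : x = e
            · subst hex; rw [List.count_cons_self]; omega
            · rw [List.count_cons_of_ne hex]; exact hcnt
        · rintro (hd | ⟨h1, h2⟩ | hcnt)
          · exact Or.inl hd
          · rcases List.mem_cons.mp h2 with rfl | h2'
            · exact absurd h1 hm
            · exact Or.inr (Or.inl ⟨Or.inl h1, h2'⟩)
          · by_cases hex : x = e
            · subst hex
              rw [List.count_cons_self] at hcnt
              exact Or.inr (Or.inl ⟨Or.inr rfl, List.count_pos_iff.mp (by omega)⟩)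
            · rw [List.count_cons_of_ne hex] at hcnt
              exact Or.inr (Or.inr hcnt)

-- filtering set(c) by a predicate holding only on count-≤-1 elements equals filtering c
theorem pv_filter_ofList (p : Int → Bool) (c : List Int)
    (h : ∀ e, p e = true → c.count e ≤ 1) :
    (PySem.Set.ofList c).filter p = c.filter p := by
  induction c with
  | nil => rfl
  | cons x c ih =>
      rw [PySem.Set.ofList_cons]
      by_cases hpx : p x = true
      · have hx1 : (x :: c).count x ≤ 1 := h x hpx
        have hxc : x ∉ c := by
          intro hm
          have := List.count_pos_iff.mpr hm
          simp at hx1; omega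
        have : PySem.Set.discard (PySem.Set.ofList c) x = PySem.Set.ofList c := by
          apply List.filter_eq_self.mpr
          intro a ha
          have : a ∈ c := PySem.Set.mem_ofList _ _ |>.mp ha
          have : a ≠ x := fun hh => hxc (hh ▸ this)
          simp [PySem.Set.discard, this]
        rw [this, List.filter_cons_of_pos hpx, List.filter_cons_of_pos hpx]
        rw [ih (fun e he => by have := h e he; simp [List.count_cons] at this; omega)]
      · simp only [Bool.not_eq_true] at hpx
        rw [List.filter_cons_of_neg (by simp [hpx]), List.filter_cons_of_neg (by simp [hpx])]
        have hcomm : (PySem.Set.discard (PySem.Set.ofList c) x).filter p = (PySem.Set.ofList c).filter p := by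
          unfold PySem.Set.discard
          rw [List.filter_filter]
          apply List.filter_congr
          intro a _
          by_cases hpa : p a = true
          · have : a ≠ x := fun hh => by rw [hh] at hpa; rw [hpa] at hpx; cases hpx
            simp [hpa, this]
          · simp only [Bool.not_eq_true] at hpa; simp [hpa]
        rw [hcomm, ih (fun e he => by have := h e he; simp [List.count_cons] at this; omega)]

-- ===== VERDICT (by name: the statement is the Claim_ definition above) =====
theorem A_Ex8_spec : Claim_equal_A_Ex8 := by
  intro l _
  unfold Spec_A_Ex8
  rw [pv_A_eq]
  simp only [A_Ex8_alt]
  rw [pv_B_flat]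
  set c := l.flatten with hc
  set P := c.foldl (fun p x =>
        if PySem.Set.contains p.1 x then (p.1, PySem.Set.add p.2 x)
        else (PySem.Set.add p.1 x, p.2)) (PySem.Set.empty, PySem.Set.empty) with hP
  have hseen : P.1 = PySem.Set.ofList c := by
    rw [hP, pv_B_seen c _ (by simp [PySem.Set.empty])]
    rw [PySem.Set.ofList_eq_foldl]
    rfl
  have hdup : ∀ e, e ∈ P.2 ↔ 2 ≤ c.count e := by
    intro e
    rw [hP, pv_B_dup c _ e (by simp [PySem.Set.empty])]
    simp [PySem.Set.empty]
  unfold PySem.Set.diff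
  rw [hseen]
  have hfun : (fun x => !(PySem.Set.contains P.2 x)) = (fun e => !(decide (c.count e > 1))) := by
    funext x
    have := hdup x
    by_cases hx : x ∈ P.2
    · simp [PySem.Set.contains_eq_listContains, hx, show c.count x > 1 by have := this.mp hx; omega]
    · have : ¬ 2 ≤ c.count x := fun hh => hx (this.mpr hh)
      simp [PySem.Set.contains_eq_listContains, hx, show ¬ c.count x > 1 by omega]
  rw [hfun]
  rw [pv_filter_ofList _ c (fun e he => by simp at he; omega)]
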